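-- pv_equiv track=rewrite | github.com/ishaan-bit/leo | enrichment-worker/src/utils/emotion_schema.py | _find_closest_string
-- ===== SOURCE A (Python) =====
-- def _find_closest_string(target: str, candidates: list[str]) -> str:
--     """
--     Find closest string match using simple edit distance.
--     For production, use cosine similarity with embeddings.
--     """
--     target_lower = target.lower()
--
--     # Exact match (case-insensitive)
--     for candidate in candidates:
--         if candidate.lower() == target_lower:
--             return candidate
--
--     # Substring match
--     for candidate in candidates:
--         if target_lower in candidate.lower() or candidate.lower() in target_lower:
--             return candidate
--
--     # Fallback to first candidate
--     return candidates[0]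
-- ===== SOURCE B (Python) =====
-- def _find_closest_string(target: str, candidates: list[str]) -> str:
--     """Rank each candidate (0 = exact, 1 = substring, 2 = other) and return the
--     argmin by (rank, index): min-by-key replaces A's staged scans."""
--     target_lower = target.lower()
--
--     def rank(c):
--         cl = c.lower()
--         if cl == target_lower:
--             return 0
--         if target_lower in cl or cl in target_lower:
--             return 1
--         return 2
--
--     return min(enumerate(candidates), key=lambda p: (rank(p[1]), p[0]))[1]
-- ===== Notes on version B (the rewrite author's own statement) =====
-- stated objective: alternative
-- what changed: A's three stages (exact-match scan, substring scan, fallback to candidates[0]) are replaced by a single argmin: each candidate is scored 0/1/2 (exact/substring/other) and min(enumerate(candidates), key=(rank, index)) picks the winner.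
import Mathlib
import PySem

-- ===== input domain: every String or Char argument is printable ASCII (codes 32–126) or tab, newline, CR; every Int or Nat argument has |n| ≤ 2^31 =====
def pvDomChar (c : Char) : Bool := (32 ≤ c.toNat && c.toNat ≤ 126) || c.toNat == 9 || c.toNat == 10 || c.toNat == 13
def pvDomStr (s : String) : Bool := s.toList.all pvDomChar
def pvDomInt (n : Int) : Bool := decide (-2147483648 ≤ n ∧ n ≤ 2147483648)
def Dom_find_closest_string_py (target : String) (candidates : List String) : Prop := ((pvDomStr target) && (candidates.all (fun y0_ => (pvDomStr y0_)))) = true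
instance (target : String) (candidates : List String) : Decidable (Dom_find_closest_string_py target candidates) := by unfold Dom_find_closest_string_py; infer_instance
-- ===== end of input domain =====

-- B replaces A's staged scans (exact pass, then substring pass, then candidates[0]) by a
-- single argmin over a 0/1/2 ranking keyed by (rank, index): same values, a different decomposition.

-- ===== PORT A =====
-- first loop of A: return first candidate whose lower() equals target_lower
def pvA_exactScan (tl : String) : List String → Option String
  | [] => none
  | c :: rest =>
    if PySem.Str.lower c = tl then some c else pvA_exactScan tl rest

-- second loop of A: return first candidate related to target_lower by substring either way
def pvA_subScan (tl : String) : List String → Option String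
  | [] => none
  | c :: rest =>
    if PySem.Str.isIn tl (PySem.Str.lower c) || PySem.Str.isIn (PySem.Str.lower c) tl
    then some c else pvA_subScan tl rest

def find_closest_string_py (target : String) (candidates : List String) : String :=
  let target_lower := PySem.Str.lower target
  match pvA_exactScan target_lower candidates with
  | some c => c
  | none =>
    match pvA_subScan target_lower candidates with
    | some c => c
    | none => (PySem.List.pyGet? candidates 0).getD ""  -- none = IndexError, excluded by Pre_

-- ===== PORT B =====
-- Source B's rank(c): 0 exact, 1 substring either way, 2 otherwise
def pvB_rank (tl c : String) : Nat :=
  let cl := PySem.Str.lower c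
  if cl = tl then 0
  else if PySem.Str.isIn tl cl || PySem.Str.isIn cl tl then 1
  else 2

-- enumerate(candidates) starting at index k
def pvB_enum (k : Nat) : List String → List (Nat × String)
  | [] => []
  | c :: rest => (k, c) :: pvB_enum (k + 1) rest

-- Python's min with key (rank p.2, p.1): fold that keeps the first element whose key is
-- strictly smaller than the current best's key (lexicographic on the pair)
def pvB_minFold (tl : String) : (Nat × Nat × String) → List (Nat × String) → (Nat × Nat × String)
  | best, [] => best
  | (br, bi, bc), (i, c) :: rest =>
    let r := pvB_rank tl c
    pvB_minFold tl (if r < br ∨ (r = br ∧ i < bi) then (r, i, c) else (br, bi, bc)) rest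

def find_closest_string_py_alt (target : String) (candidates : List String) : String :=
  let target_lower := PySem.Str.lower target
  match pvB_enum 0 candidates with
  | [] => ""  -- min() raises ValueError on an empty sequence, excluded by Pre_
  | (i, c) :: rest => (pvB_minFold target_lower (pvB_rank target_lower c, i, c) rest).2.2

-- ===== PRECONDITION & SPEC =====
-- A raises IndexError at 'candidates[0]' (and B's min raises ValueError) exactly when candidates is empty.
def Pre_find_closest_string_py (target : String) (candidates : List String) : Prop :=
  candidates ≠ []
instance (target : String) (candidates : List String) : Decidable (Pre_find_closest_string_py target candidates) := by unfold Pre_find_closest_string_py; infer_instance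
def pvWitness_find_closest_string_py : String × List String := ("ab", ["xy", "AB"])

def Spec_find_closest_string_py (target : String) (candidates : List String) (out : String) : Prop := out = find_closest_string_py_alt target candidates
instance (target : String) (candidates : List String) (out : String) : Decidable (Spec_find_closest_string_py target candidates out) := by unfold Spec_find_closest_string_py; infer_instance

-- ===== CLAIM (what is proved, stated in full; the proofs are below) =====
def Claim_equal_find_closest_string_py : Prop := ∀ (target : String) (candidates : List String), Dom_find_closest_string_py target candidates → Pre_find_closest_string_py target candidates → Spec_find_closest_string_py target candidates (find_closest_string_py target candidates)

-- ===== LEMMAS AND PROOFS =====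

-- The min-fold, started at an accumulator whose rank is at most 2 and whose index bi
-- precedes all enumerated indices, refines the accumulator exactly as A's staged scans would.
theorem pvB_minFold_spec (tl bc : String) (br bi k : Nat) (cs : List String)
    (hbr : br ≤ 2) (h : bi < k) :
    (pvB_minFold tl (br, bi, bc) (pvB_enum k cs)).2.2 =
      if br = 0 then bc
      else if br = 1 then (pvA_exactScan tl cs).getD bc
      else ((pvA_exactScan tl cs).orElse (fun _ => pvA_subScan tl cs)).getD bc := by
  induction cs generalizing br bi bc k with
  | nil => split_ifs <;> simp [pvB_enum, pvB_minFold, pvA_exactScan, pvA_subScan]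
  | cons c rest ih =>
    by_cases h1 : PySem.Str.lower c = tl
    · have hr : pvB_rank tl c = 0 := by simp [pvB_rank, h1]
      have hA : pvA_exactScan tl (c :: rest) = some c := by simp [pvA_exactScan, h1]
      simp only [pvB_enum, pvB_minFold, hr, hA]
      rcases Nat.eq_zero_or_pos br with hbr0 | hbr0
    
      · subst hbr0
        rw [if_neg (by omega : ¬ ((0:Nat) < 0 ∨ ((0:Nat) = 0 ∧ k < bi))),
          ih bc 0 bi (k+1) (by omega) (by omega)]
        simp
      · rw [if_pos (Or.inl hbr0), ih c 0 k (k+1) (by omega) (by omega)]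
        have hne : ¬ br = 0 := by omega
        simp only [if_neg hne]
        split_ifs <;> simp
    · by_cases h2 : PySem.Chars.isIn tl.toList (PySem.Chars.lower c.toList) ||
          PySem.Chars.isIn (PySem.Chars.lower c.toList) tl.toList
      · have hr : pvB_rank tl c = 1 := by simp [pvB_rank, h1, h2]
        have hA : pvA_exactScan tl (c :: rest) = pvA_exactScan tl rest := by
          simp [pvA_exactScan, h1]
        have hS : pvA_subScan tl (c :: rest) = some c := by simp [pvA_subScan, h2]
        simp only [pvB_enum, pvB_minFold, hr, hA, hS]
        rcases Nat.lt_trichotomy br 1 with hbr1 | hbr1 | hbr1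
        · have hbr0 : br = 0 := by omega
          subst hbr0
          rw [if_neg (by omega : ¬ ((1:Nat) < 0 ∨ ((1:Nat) = 0 ∧ k < bi))),
            ih bc 0 bi (k+1) (by omega) (by omega)]
          simp
        · subst hbr1
          rw [if_neg (by omega : ¬ ((1:Nat) < 1 ∨ ((1:Nat) = 1 ∧ k < bi))),
            ih bc 1 bi (k+1) (by omega) (by omega)]
          simp
        · rw [if_pos (Or.inl hbr1), ih c 1 k (k+1) (by omega) (by omega)]
          have hb0 : ¬ br = 0 := by omega
          have hb1 : ¬ br = 1 := by omega
          simp only [if_neg hb0, if_neg hb1, if_neg (by omega : ¬ (1:Nat) = 0)]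
          cases pvA_exactScan tl rest <;> simp
      · have hr : pvB_rank tl c = 2 := by simp [pvB_rank, h1, h2]
        have hA : pvA_exactScan tl (c :: rest) = pvA_exactScan tl rest := by
          simp [pvA_exactScan, h1]
        have hS : pvA_subScan tl (c :: rest) = pvA_subScan tl rest := by
          simp [pvA_subScan, h2]
        simp only [pvB_enum, pvB_minFold, hr, hA, hS]
        rw [if_neg (by omega : ¬ ((2:Nat) < br ∨ ((2:Nat) = br ∧ k < bi))),
          ih bc br bi (k+1) hbr (by omega)]

-- ===== VERDICT (by name: the statement is the Claim_ definition above) =====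
theorem find_closest_string_py_spec : Claim_equal_find_closest_string_py := by
  intro target candidates _ hpre
  unfold Spec_find_closest_string_py find_closest_string_py find_closest_string_py_alt
  cases candidates with
  | nil => exact absurd rfl hpre
  | cons c rest =>
    simp only [pvB_enum]
    by_cases h1 : PySem.Str.lower c = PySem.Str.lower target
    · have hr : pvB_rank (PySem.Str.lower target) c = 0 := by simp [pvB_rank, h1]
      rw [hr, pvB_minFold_spec (PySem.Str.lower target) c 0 0 1 rest (by omega) (by omega)]
      simp [pvA_exactScan, h1]
    · by_cases h2 : PySem.Chars.isIn (PySem.Chars.lower target.toList) (PySem.Chars.lower c.toList) ||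
          PySem.Chars.isIn (PySem.Chars.lower c.toList) (PySem.Chars.lower target.toList)
      · have hr : pvB_rank (PySem.Str.lower target) c = 1 := by simp [pvB_rank, h1, h2]
        have hA : pvA_exactScan (PySem.Str.lower target) (c :: rest) =
            pvA_exactScan (PySem.Str.lower target) rest := by simp [pvA_exactScan, h1]
        have hS : pvA_subScan (PySem.Str.lower target) (c :: rest) = some c := by
          simp [pvA_subScan, h2]
        rw [hr, pvB_minFold_spec (PySem.Str.lower target) c 1 0 1 rest (by omega) (by omega)]
        simp only [hA, hS]
        cases pvA_exactScan (PySem.Str.lower target) rest <;> simp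
      · have hr : pvB_rank (PySem.Str.lower target) c = 2 := by simp [pvB_rank, h1, h2]
        have hA : pvA_exactScan (PySem.Str.lower target) (c :: rest) =
            pvA_exactScan (PySem.Str.lower target) rest := by simp [pvA_exactScan, h1]
        have hS : pvA_subScan (PySem.Str.lower target) (c :: rest) =
            pvA_subScan (PySem.Str.lower target) rest := by simp [pvA_subScan, h2]
        rw [hr, pvB_minFold_spec (PySem.Str.lower target) c 2 0 1 rest (by omega) (by omega)]
        simp only [hA, hS]
        cases pvA_exactScan (PySem.Str.lower target) rest <;>
          cases pvA_subScan (PySem.Str.lower target) rest <;>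
            simp [PySem.List.pyGet?, PySem.List.pyIdx?]
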